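-- pv_equiv track=rewrite | github.com/sunnyflyingsky/zhang-lab | working/02.regression_classification/processor.py | trans_knot
-- ===== SOURCE A (Python) =====
-- knot_char = ['.', '[']  #3
--
-- MAX_SEQ_PROTEIN = 31
--
-- def trans_knot(x):
--     '''
--     截取31bp长的RNA knots
--     '''
--     temp = list(x.upper())
--     temp = [i if i in knot_char else '?' for i in temp]
--     if len(temp) < MAX_SEQ_PROTEIN:
--         temp = temp + ['?'] * (MAX_SEQ_PROTEIN - len(temp))
--     else:
--         temp = temp[:MAX_SEQ_PROTEIN]
--     return temp
-- ===== SOURCE B (Python) =====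
-- knot_char = ['.', '[']  #3
--
-- MAX_SEQ_PROTEIN = 31
--
-- def trans_knot(x):
--     u = list(x.upper())
--     out = []
--     for i in range(MAX_SEQ_PROTEIN):
--         c = u[i] if i < len(u) else '?'
--         out.append(c if c in knot_char else '?')
--     return out
-- ===== Notes on version B (the rewrite author's own statement) =====
-- stated objective: faster
-- what changed: Instead of mapping a membership test over every character of the input and then separately padding or truncating, B drives a single loop over the 31 output positions, reading the uppercased input (or '?' past its end) at each position, so only 31 characters are ever tested and the pad/truncate branch disappears.
import Mathlib
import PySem

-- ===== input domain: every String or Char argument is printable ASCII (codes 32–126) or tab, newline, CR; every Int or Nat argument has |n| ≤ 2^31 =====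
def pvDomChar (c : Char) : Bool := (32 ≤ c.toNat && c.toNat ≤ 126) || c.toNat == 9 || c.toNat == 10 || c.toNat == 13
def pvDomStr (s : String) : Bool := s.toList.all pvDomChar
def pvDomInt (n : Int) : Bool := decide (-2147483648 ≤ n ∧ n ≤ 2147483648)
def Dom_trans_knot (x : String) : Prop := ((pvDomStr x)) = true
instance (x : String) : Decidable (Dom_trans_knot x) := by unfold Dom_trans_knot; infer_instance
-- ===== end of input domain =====

-- ===== PORT A =====
-- knot_char = ['.', '['] ; singleton strings, matching Python's list of 1-char strings
def knotChar : List String := [".", "["]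

-- literal port of A: map over the uppercased chars, then pad with '?' or truncate to 31
def trans_knot (x : String) : List String :=
  let temp := (PySem.Chars.upper x.toList).map (fun c => String.ofList [c])
  let temp := temp.map (fun i => if i ∈ knotChar then i else "?")
  if temp.length < 31 then temp ++ List.replicate (31 - temp.length) "?" else temp.take 31

-- ===== PORT B =====
-- literal port of B: one loop over the 31 output positions, reading u[i] or '?' past the end
def trans_knot_alt (x : String) : List String :=
  let u := (PySem.Chars.upper x.toList).map (fun c => String.ofList [c])
  (PySem.List.pyRange 0 31 1).map (fun i =>
    let c := if i < (u.length : Int) then PySem.List.pyGetD u i "?" else "?"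
    if c ∈ knotChar then c else "?")

-- ===== PRECONDITION & SPEC =====
def Spec_trans_knot (x : String) (out : List String) : Prop := out = trans_knot_alt x
instance (x : String) (out : List String) : Decidable (Spec_trans_knot x out) := by unfold Spec_trans_knot; infer_instance

-- ===== CLAIM (what is proved, stated in full; the proofs are below) =====
def Claim_equal_trans_knot : Prop := ∀ (x : String), Dom_trans_knot x → Spec_trans_knot x (trans_knot x)

-- ===== LEMMAS AND PROOFS =====

-- key lemma: the pad/truncate form equals the output-position-driven form, for any list of strings
theorem trans_knot_eq_aux (us : List String) :
    (if (us.map (fun i => if i ∈ knotChar then i else "?")).length < 31 then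
       us.map (fun i => if i ∈ knotChar then i else "?") ++
         List.replicate (31 - (us.map (fun i => if i ∈ knotChar then i else "?")).length) "?"
     else (us.map (fun i => if i ∈ knotChar then i else "?")).take 31)
    = (PySem.List.pyRange 0 31 1).map (fun i =>
        let c := if i < (us.length : Int) then PySem.List.pyGetD us i "?" else "?"
        if c ∈ knotChar then c else "?") := by
  apply List.ext_getElem
  · simp [PySem.List.length_pyRange_one]
    split <;> simp_all <;> omega
  · intro n h1 h2
    have hn : n < 31 := by
      simpa [PySem.List.length_pyRange_one] using h2
    rw [List.getElem_map, PySem.List.getElem_pyRange_one]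
    simp only [zero_add]
    by_cases hlt : n < us.length
    · have hi : ((n : Int)) < (us.length : Int) := by exact_mod_cast hlt
      rw [if_pos hi, PySem.List.pyGetD_natCast, List.getD_eq_getElem us "?" hlt]
      split
      · rw [List.getElem_append_left (by simpa using hlt)]
        simp
      · rw [List.getElem_take, List.getElem_map]
    · have hge : ¬ ((n : Int) < (us.length : Int)) := by
        simp; exact_mod_cast Nat.le_of_not_lt hlt
      rw [if_neg hge]
      have hz : ("?" : String) ∉ knotChar := by decide
      rw [if_neg hz]
      split
      · rw [List.getElem_append_right (by simpa using hlt)]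
        simp
      · exfalso
        simp at *
        omega

-- ===== VERDICT (by name: the statement is the Claim_ definition above) =====
theorem trans_knot_spec : Claim_equal_trans_knot := by
  intro x _
  unfold Spec_trans_knot trans_knot trans_knot_alt
  exact trans_knot_eq_aux _
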